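-- pv_equiv track=rewrite | github.com/owengohh/ubs-coding-challenge | routes/bugfixer1.py | calculate_min_time
-- ===== SOURCE A (Python) =====
-- from collections import deque
--
-- def calculate_min_time(time_list, prerequisites):
--     n = len(time_list)
--     if n == 0:
--         return 0
--     projects = [i + 1 for i in range(n)]
--     duration = {i + 1: time_list[i] for i in range(n)}  # Map project number to its duration
--
--     indegrees = {i + 1: 0 for i in range(n)}
--     graph = {i + 1: [] for i in range(n)}
--
--     for a, b in prerequisites:
--         graph[a].append(b)
--         indegrees[b] += 1
--
--     earliest_start = {i + 1: 0 for i in range(n)}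
--     earliest_finish = {i + 1: 0 for i in range(n)}
--
--     queue = deque([project for project in projects if indegrees[project] == 0])
--
--     # toposort algo
--     while queue:
--         project = queue.popleft()
--         earliest_finish[project] = earliest_start[project] + duration[project]
--
--         for preReq in graph[project]:
--             earliest_start[preReq] = max(earliest_start[preReq], earliest_finish[project])
--             indegrees[preReq] -= 1
--             if indegrees[preReq] == 0:
--                 queue.append(preReq)
--
--     total_time = max(earliest_finish.values())
--     return total_time
-- ===== SOURCE B (Python) =====
-- from collections import deque
--
-- def calculate_min_time(time_list, prerequisites):
--     n = len(time_list)
--     if n == 0: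
--         return 0
--     # Phase 0: successor graph, predecessor map, indegrees
--     succ = {v: [] for v in range(1, n + 1)}
--     preds = {v: [] for v in range(1, n + 1)}
--     indeg = {v: 0 for v in range(1, n + 1)}
--     for a, b in prerequisites:
--         succ[a].append(b)
--         preds[b].append(a)
--         indeg[b] += 1
--     # Phase 1: Kahn's algorithm, producing only the topological order
--     queue = deque(v for v in range(1, n + 1) if indeg[v] == 0)
--     order = []
--     while queue:
--         v = queue.popleft()
--         order.append(v)
--         for w in succ[v]:
--             indeg[w] -= 1
--             if indeg[w] == 0:
--                 queue.append(w)
--     # Phase 2: pull-style DP along the order (cyclic nodes keep finish 0)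
--     finish = {v: 0 for v in range(1, n + 1)}
--     for v in order:
--         s = 0
--         for p in preds[v]:
--             s = max(s, finish[p])
--         finish[v] = time_list[v - 1] + s
--     return max(finish.values())
-- ===== Notes on version B (the rewrite author's own statement) =====
-- stated objective: alternative
-- what changed: A interleaves the earliest-start/finish time computation inside a single Kahn BFS that pushes finish times forward along successor edges; B separates concerns into three passes: build a predecessor map, run Kahn's algorithm purely to emit a topological order, then compute finish times by a pull-style DP over the predecessor map along that order.
import Mathlib
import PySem

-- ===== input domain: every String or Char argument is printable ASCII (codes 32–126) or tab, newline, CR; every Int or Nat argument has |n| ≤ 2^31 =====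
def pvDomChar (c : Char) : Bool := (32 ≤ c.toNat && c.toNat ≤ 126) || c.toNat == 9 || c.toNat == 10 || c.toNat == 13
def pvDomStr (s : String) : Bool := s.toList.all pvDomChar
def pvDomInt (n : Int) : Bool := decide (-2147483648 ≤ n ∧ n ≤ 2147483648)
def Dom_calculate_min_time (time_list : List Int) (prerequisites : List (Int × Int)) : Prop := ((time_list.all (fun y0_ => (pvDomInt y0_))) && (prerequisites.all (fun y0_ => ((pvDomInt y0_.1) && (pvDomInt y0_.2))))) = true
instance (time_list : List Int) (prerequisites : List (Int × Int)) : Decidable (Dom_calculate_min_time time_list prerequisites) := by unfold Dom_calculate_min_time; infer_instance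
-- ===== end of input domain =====

-- B replaces A's single interleaved Kahn BFS (which pushes finish times forward along
-- successor edges while sorting) by three separate passes: build a predecessor map,
-- run Kahn's algorithm only to emit a topological order, then a pull-style DP over the
-- predecessors along that order.  Same O(n+e) cost; objective: alternative decomposition.

-- ===== PORT A =====
-- A's toposort loop, state (queue, earliest_start, earliest_finish, indegrees) exactly
-- as in the Python.  The while-loop is made total by fuel; under Pre_ every project is
-- popped at most once, so fuel n + e + 1 never runs out where the Python terminates.
-- Dict accesses like es[project] are ported as getD with an arbitrary default: under
-- Pre_ the key is always present, so this is exact (outside Pre_ the Python raises).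
def pvALoop (graph : PySem.Dict Int (List Int)) (dur : PySem.Dict Int Int) :
    Nat → List Int → PySem.Dict Int Int → PySem.Dict Int Int → PySem.Dict Int Int →
    PySem.Dict Int Int
  | 0, _, _, ef, _ => ef
  | _ + 1, [], _, ef, _ => ef
  | fuel + 1, v :: q, es, ef, indeg =>
      let fin := es.getD v 0 + dur.getD v 0
      let ef' := ef.insert v fin
      let st :=
        (graph.getD v []).foldl
          (fun (st : PySem.Dict Int Int × PySem.Dict Int Int × List Int) b =>
            let es' := st.1.insert b (max (st.1.getD b 0) fin)
            let ind' := st.2.1.insert b (st.2.1.getD b 0 - 1)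
            (es', ind', if ind'.getD b 0 == 0 then st.2.2 ++ [b] else st.2.2))
          (es, indeg, q)
      pvALoop graph dur fuel st.2.2 st.1 ef' st.2.1

def calculate_min_time (time_list : List Int) (prerequisites : List (Int × Int)) : Int :=
  let n : Int := time_list.length
  if n == 0 then 0
  else
    let projects := (PySem.List.pyRange 0 n 1).map (fun i => i + 1)
    let duration := (PySem.List.pyRange 0 n 1).foldl
      (fun d i => d.insert (i + 1) (PySem.List.pyGetD time_list i 0)) PySem.Dict.empty
    let indegrees : PySem.Dict Int Int := (PySem.List.pyRange 0 n 1).foldl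
      (fun d i => d.insert (i + 1) 0) PySem.Dict.empty
    let graph : PySem.Dict Int (List Int) := (PySem.List.pyRange 0 n 1).foldl
      (fun d i => d.insert (i + 1) []) PySem.Dict.empty
    -- for a, b in prerequisites: graph[a].append(b); indegrees[b] += 1
    -- (modify with a default: exact under Pre_, where both keys are present)
    let built := prerequisites.foldl
      (fun (st : PySem.Dict Int (List Int) × PySem.Dict Int Int) ab =>
        (st.1.modify ab.1 [] (fun l => l ++ [ab.2]), st.2.modify ab.2 0 (fun x => x + 1)))
      (graph, indegrees)
    let es0 : PySem.Dict Int Int := (PySem.List.pyRange 0 n 1).foldl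
      (fun d i => d.insert (i + 1) 0) PySem.Dict.empty
    let ef0 : PySem.Dict Int Int := (PySem.List.pyRange 0 n 1).foldl
      (fun d i => d.insert (i + 1) 0) PySem.Dict.empty
    let queue := projects.filter (fun p => built.2.getD p 0 == 0)
    let ef := pvALoop built.1 duration (time_list.length + prerequisites.length + 1)
      queue es0 ef0 built.2
    -- max(earliest_finish.values()): nonempty here since n ≠ 0
    (PySem.List.max? ef.values (fun x => x)).getD 0

-- ===== PORT B =====
-- Phase 1 of B: Kahn's algorithm producing only the topological order (fuel as above).
def pvPhase1 (succ : PySem.Dict Int (List Int)) :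
    Nat → List Int → PySem.Dict Int Int → List Int → List Int
  | 0, _, _, order => order
  | _ + 1, [], _, order => order
  | fuel + 1, v :: q, indeg, order =>
      let st :=
        (succ.getD v []).foldl
          (fun (st : PySem.Dict Int Int × List Int) w =>
            let ind' := st.1.insert w (st.1.getD w 0 - 1)
            (ind', if ind'.getD w 0 == 0 then st.2 ++ [w] else st.2))
          (indeg, q)
      pvPhase1 succ fuel st.2 st.1 (order ++ [v])

-- Phase 2 of B: pull-style DP along the order over the predecessor map.
def pvPhase2 (preds : PySem.Dict Int (List Int)) (tl : List Int)
    (order : List Int) (fin0 : PySem.Dict Int Int) : PySem.Dict Int Int :=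
  order.foldl
    (fun fin v =>
      let s := (preds.getD v []).foldl (fun s p => max s (fin.getD p 0)) 0
      fin.insert v (PySem.List.pyGetD tl (v - 1) 0 + s))
    fin0

def calculate_min_time_alt (time_list : List Int) (prerequisites : List (Int × Int)) : Int :=
  let n : Int := time_list.length
  if n == 0 then 0
  else
    let succ0 : PySem.Dict Int (List Int) := (PySem.List.pyRange 1 (n + 1) 1).foldl
      (fun d v => d.insert v []) PySem.Dict.empty
    let preds0 : PySem.Dict Int (List Int) := (PySem.List.pyRange 1 (n + 1) 1).foldl
      (fun d v => d.insert v []) PySem.Dict.empty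
    let indeg0 : PySem.Dict Int Int := (PySem.List.pyRange 1 (n + 1) 1).foldl
      (fun d v => d.insert v 0) PySem.Dict.empty
    -- for a, b in prerequisites: succ[a].append(b); preds[b].append(a); indeg[b] += 1
    let built := prerequisites.foldl
      (fun (t : PySem.Dict Int (List Int) × PySem.Dict Int (List Int) × PySem.Dict Int Int) ab =>
        (t.1.modify ab.1 [] (fun l => l ++ [ab.2]),
         t.2.1.modify ab.2 [] (fun l => l ++ [ab.1]),
         t.2.2.modify ab.2 0 (fun x => x + 1)))
      (succ0, preds0, indeg0)
    let queue := (PySem.List.pyRange 1 (n + 1) 1).filter (fun v => built.2.2.getD v 0 == 0)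
    let order := pvPhase1 built.1 (time_list.length + prerequisites.length + 1)
      queue built.2.2 []
    let fin0 : PySem.Dict Int Int := (PySem.List.pyRange 1 (n + 1) 1).foldl
      (fun d v => d.insert v 0) PySem.Dict.empty
    let finish := pvPhase2 built.2.1 time_list order fin0
    (PySem.List.max? finish.values (fun x => x)).getD 0

-- ===== PRECONDITION & SPEC =====
-- Pre_ excludes exactly the inputs on which the Python A raises (KeyError: some
-- prerequisite names a project id outside 1..len(time_list), reached only when the
-- time list is nonempty); B raises there too.
def Pre_calculate_min_time (time_list : List Int) (prerequisites : List (Int × Int)) : Prop :=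
  time_list = [] ∨ ∀ ab ∈ prerequisites,
    1 ≤ ab.1 ∧ ab.1 ≤ (time_list.length : Int) ∧ 1 ≤ ab.2 ∧ ab.2 ≤ (time_list.length : Int)
instance (time_list : List Int) (prerequisites : List (Int × Int)) :
    Decidable (Pre_calculate_min_time time_list prerequisites) := by
  unfold Pre_calculate_min_time; infer_instance

def pvWitness_calculate_min_time : List Int × (List (Int × Int)) :=
  ([3, 2, 5], [(1, 3), (2, 3)])

def Spec_calculate_min_time (time_list : List Int) (prerequisites : List (Int × Int)) (out : Int) : Prop := out = calculate_min_time_alt time_list prerequisites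
instance (time_list : List Int) (prerequisites : List (Int × Int)) (out : Int) : Decidable (Spec_calculate_min_time time_list prerequisites out) := by unfold Spec_calculate_min_time; infer_instance

-- ===== CLAIM (what is proved, stated in full; the proofs are below) =====
def Claim_equal_calculate_min_time : Prop := ∀ (time_list : List Int) (prerequisites : List (Int × Int)), Dom_calculate_min_time time_list prerequisites → Pre_calculate_min_time time_list prerequisites → Spec_calculate_min_time time_list prerequisites (calculate_min_time time_list prerequisites)

-- ===== LEMMAS AND PROOFS =====

-- The project ids 1..n.
def pvK (n : Nat) : List Int := (List.range n).map (fun (k : Nat) => (k : Int) + 1)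

-- Predecessors / successors of a node, with edge multiplicity, in input order.
def pvP (pr : List (Int × Int)) (v : Int) : List Int :=
  (pr.filter (fun ab => ab.2 == v)).map (·.1)
def pvS (pr : List (Int × Int)) (v : Int) : List Int :=
  (pr.filter (fun ab => ab.1 == v)).map (·.2)

-- max(0, max of f over the predecessors of v)
def pvPull (pr : List (Int × Int)) (f : Int → Int) (v : Int) : Int :=
  (pvP pr v).foldl (fun s p => max s (f p)) 0

-- The finish-time function after processing the nodes of o in order, from f0.
def pvFinFrom (tl : List Int) (pr : List (Int × Int)) (f0 : Int → Int) (o : List Int) :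
    Int → Int :=
  o.foldl (fun f v => fun u =>
    if u = v then PySem.List.pyGetD tl (v - 1) 0 + pvPull pr f v else f u) f0
def pvFin (tl : List Int) (pr : List (Int × Int)) (o : List Int) : Int → Int :=
  pvFinFrom tl pr (fun _ => 0) o

-- The common initial dict with keys 1..n and value f k at key k.
def pvInit {ν : Type} (n : Nat) (f : Int → ν) : PySem.Dict Int ν :=
  (List.range n).foldl (fun d (k : Nat) => d.insert ((k : Int) + 1) (f ((k : Int) + 1)))
    PySem.Dict.empty

lemma pvK_mem (n : Nat) (c : Int) : c ∈ pvK n ↔ 1 ≤ c ∧ c ≤ (n : Int) := by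
  unfold pvK
  simp only [List.mem_map, List.mem_range]
  constructor
  · rintro ⟨k, hk, rfl⟩; omega
  · rintro ⟨h1, h2⟩; exact ⟨(c - 1).toNat, by omega, by omega⟩

lemma pvK_nodup (n : Nat) : (pvK n).Nodup := by
  exact List.nodup_range.map (fun a b hab => by omega)

lemma pvInit_items {ν : Type} (n : Nat) (f : Int → ν) :
    (pvInit n f).items = (pvK n).map (fun v => (v, f v)) := by
  induction n with
  | zero => rfl
  | succ m ih =>
    unfold pvInit at ih ⊢
    rw [List.range_succ, List.foldl_append, List.foldl_cons, List.foldl_nil,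
      PySem.Dict.items_insert_of_not_contains, ih]
    · have : pvK (m + 1) = pvK m ++ [(m : Int) + 1] := by
        unfold pvK; rw [List.range_succ, List.map_append]; rfl
      rw [this, List.map_append]; rfl
    · rw [PySem.Dict.contains_eq_decide_mem_keys]
      have hk : (List.foldl (fun d (k : Nat) => d.insert ((k : Int) + 1) (f ((k : Int) + 1)))
          PySem.Dict.empty (List.range m)).keys = pvK m := by
        simp only [PySem.Dict.keys, ih, List.map_map]
        simp [Function.comp_def]
      rw [hk]
      simp only [decide_eq_false_iff_not]
      rw [pvK_mem]; omega

lemma pvInit_keys {ν : Type} (n : Nat) (f : Int → ν) : (pvInit n f).keys = pvK n := by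
  simp only [PySem.Dict.keys, pvInit_items, List.map_map]
  simp [Function.comp_def]

lemma pvInit_getD {ν : Type} (n : Nat) (f : Int → ν) (c : Int) (x : ν) :
    (pvInit n f).getD c x = if 1 ≤ c ∧ c ≤ (n : Int) then f c else x := by
  by_cases hc : 1 ≤ c ∧ c ≤ (n : Int)
  · rw [if_pos hc]
    exact PySem.Dict.getD_of_mem_items _
      (by rw [pvInit_items]; exact List.mem_map_of_mem ((pvK_mem n c).2 hc))
      (by rw [pvInit_keys]; exact pvK_nodup n) x
  · rw [if_neg hc]
    refine PySem.Dict.getD_of_not_contains _ x ?_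
    rw [PySem.Dict.contains_eq_decide_mem_keys, pvInit_keys]
    simp only [decide_eq_false_iff_not]
    rw [pvK_mem]; exact hc

-- A's and B's per-key dict comprehensions are the same dict.
lemma pvInitA_eq {ν : Type} (n : Nat) (g : Int → ν) :
    (PySem.List.pyRange 0 (n : Int) 1).foldl
      (fun d i => d.insert (i + 1) (g i)) PySem.Dict.empty
      = pvInit n (fun v => g (v - 1)) := by
  rw [PySem.List.pyRange_one]
  rw [List.foldl_map]
  unfold pvInit
  refine PySem.List.foldl_congr_mem _ _ _ _ ?_
  intro acc k hk
  norm_num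

lemma pvInitB_eq {ν : Type} (n : Nat) (h : Int → ν) :
    (pvK n).foldl (fun d v => d.insert v (h v)) PySem.Dict.empty = pvInit n h := by
  unfold pvK pvInit
  rw [List.foldl_map]

lemma pvProjects_eq (n : Nat) :
    (PySem.List.pyRange 0 (n : Int) 1).map (fun i => i + 1) = pvK n := by
  rw [PySem.List.pyRange_one]
  unfold pvK
  rw [List.map_map]
  refine List.map_congr_left ?_
  intro k hk
  simp [Function.comp]

lemma pvRange1_eq (n : Nat) : PySem.List.pyRange 1 ((n : Int) + 1) 1 = pvK n := by
  rw [PySem.List.pyRange_one]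
  unfold pvK
  have : ((n : Int) + 1 - 1).toNat = n := by omega
  rw [this]
  refine List.map_congr_left ?_
  intro k hk
  rw [Int.add_comm 1 (k : Int)]

-- the successor/graph dict after the edge loop
lemma pvGraph_getD (pr : List (Int × Int)) (n : Nat) (c : Int) :
    (pr.foldl (fun d ab => d.modify ab.1 [] (fun l => l ++ [ab.2]))
      (pvInit n (fun _ => ([] : List Int)))).getD c [] = pvS pr c := by
  rw [PySem.Dict.getD_foldl_modify_append, pvInit_getD]
  unfold pvS
  split <;> rfl

-- the predecessor dict after the edge loop
lemma pvPreds_getD (pr : List (Int × Int)) (n : Nat) (c : Int) :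
    (pr.foldl (fun d ab => d.modify ab.2 [] (fun l => l ++ [ab.1]))
      (pvInit n (fun _ => ([] : List Int)))).getD c [] = pvP pr c := by
  have h := PySem.Dict.getD_foldl_modify_append
    (l := pr.map (fun ab => (ab.2, ab.1))) (pvInit n (fun _ => ([] : List Int))) c
  rw [List.foldl_map] at h
  rw [h, pvInit_getD]
  unfold pvP
  rw [List.filter_map, List.map_map]
  split <;> rfl

-- the indegree dict after the edge loop
lemma pvIndeg_getD (pr : List (Int × Int)) (n : Nat) (c : Int) :
    (pr.foldl (fun d ab => d.modify ab.2 0 (fun x => x + 1))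
      (pvInit n (fun _ => (0 : Int)))).getD c 0 = ((pvP pr c).length : Int) := by
  have h := PySem.Dict.getD_foldl_modify_add_one
    (l := pr.map (fun ab => ab.2)) (pvInit n (fun _ => (0 : Int))) c
  rw [List.foldl_map] at h
  rw [h, pvInit_getD]
  have hb : (if 1 ≤ c ∧ c ≤ (n : Int) then (0 : Int) else 0) = 0 := by split <;> rfl
  rw [hb, zero_add]
  congr 1
  rw [List.count_eq_countP, List.countP_map, List.countP_eq_length_filter]
  unfold pvP
  rw [List.length_map]
  rfl

lemma pvSet_update_self (s xs : List Int) (h : ∀ x ∈ xs, x ∈ s) :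
    PySem.Set.update s xs = s := by
  induction xs with
  | nil => rfl
  | cons x t ih =>
    unfold PySem.Set.update at *
    rw [List.foldl_cons]
    have : PySem.Set.add s x = s := by
      unfold PySem.Set.add PySem.Set.contains
      rw [if_pos (List.contains_iff_mem.2 (h x (List.mem_cons_self)))]
    rw [this]
    exact ih (fun y hy => h y (List.mem_cons_of_mem _ hy))

lemma pvP_mem (pr : List (Int × Int)) (v u : Int) : v ∈ pvP pr u ↔ (v, u) ∈ pr := by
  unfold pvP
  simp only [List.mem_map, List.mem_filter, beq_iff_eq]
  constructor
  · rintro ⟨ab, ⟨hab, h2⟩, h1⟩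
    cases ab; simp_all
  · intro h
    exact ⟨(v, u), ⟨h, rfl⟩, rfl⟩

lemma pvS_mem (pr : List (Int × Int)) (v u : Int) : u ∈ pvS pr v ↔ v ∈ pvP pr u := by
  rw [pvP_mem]
  unfold pvS
  simp only [List.mem_map, List.mem_filter, beq_iff_eq]
  constructor
  · rintro ⟨ab, ⟨hab, h1⟩, h2⟩
    cases ab; simp_all
  · intro h
    exact ⟨(v, u), ⟨h, rfl⟩, rfl⟩

lemma pvS_count (pr : List (Int × Int)) (v u : Int) :
    (pvS pr v).count u = (pvP pr u).count v := by
  unfold pvS pvP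
  rw [List.count_eq_countP, List.count_eq_countP, List.countP_map, List.countP_map,
    List.countP_filter, List.countP_filter]
  refine List.countP_congr ?_
  intro ab _
  simp only [Function.comp]
  rw [Bool.and_comm]

-- occurrences of v among the o-unprocessed predecessors, for v not yet processed
lemma pvCount_le (l : List Int) (o : List Int) (v : Int) (hv : v ∉ o) :
    l.count v ≤ (l.filter (fun p => !decide (p ∈ o))).length := by
  rw [List.count_eq_countP, ← List.countP_eq_length_filter]
  refine List.countP_mono_left ?_
  intro p hp hpv
  simp only [beq_iff_eq] at hpv
  subst hpv
  simpa using hv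

lemma pvCountP_split (l : List Int) (p q : Int → Bool) (hpq : ∀ a, q a = !(p a)) :
    l.countP p + l.countP q = l.length := by
  induction l with
  | nil => simp
  | cons x t ih => by_cases h : p x <;> simp [h, hpq] <;> omega

lemma pvFilter_step (l : List Int) (o : List Int) (v : Int) (hv : v ∉ o) :
    (l.filter (fun p => !decide (p ∈ o ++ [v]))).length + l.count v
      = (l.filter (fun p => !decide (p ∈ o))).length := by
  have hv' : ∀ p : Int, (!decide (p ∈ o ++ [v])) = ((p == v) = false && !decide (p ∈ o)) := by
    intro p
    by_cases hp : p ∈ o <;> by_cases hpv : p = v <;> simp [hp, hpv]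
  rw [← List.countP_eq_length_filter, ← List.countP_eq_length_filter]
  have h2 : List.countP (fun p => !decide (p ∈ o ++ [v])) l
      = List.countP (fun p => !(p == v)) (l.filter (fun p => !decide (p ∈ o))) := by
    rw [List.countP_filter]
    refine List.countP_congr ?_
    intro p _
    rw [hv' p]
    by_cases hpv : p = v <;> simp [hpv]
  have h3 : l.count v = List.countP (fun p => (p == v)) (l.filter (fun p => !decide (p ∈ o))) := by
    rw [List.count_eq_countP, List.countP_filter]
    refine List.countP_congr ?_
    intro p _
    by_cases hpv : p = v
    · subst hpv; simp [hv]
    · simp [hpv]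
  rw [h2, h3]
  have h4 := pvCountP_split (l.filter (fun p => !decide (p ∈ o)))
    (fun p => (p == v)) (fun p => !(p == v)) (fun a => rfl)
  have h5 : (l.filter (fun p => !decide (p ∈ o))).length
      = List.countP (fun p => !decide (p ∈ o)) l := List.countP_eq_length_filter.symm
  omega

lemma pvFin_append (tl : List Int) (pr : List (Int × Int)) (o : List Int) (v u : Int) :
    pvFin tl pr (o ++ [v]) u
      = if u = v then PySem.List.pyGetD tl (v - 1) 0 + pvPull pr (pvFin tl pr o) v
        else pvFin tl pr o u := by
  unfold pvFin pvFinFrom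
  rw [List.foldl_append]
  rfl

lemma pvFin_not_mem (tl : List Int) (pr : List (Int × Int)) :
    ∀ (o : List Int) (u : Int), u ∉ o → pvFin tl pr o u = 0 := by
  intro o
  induction o using List.reverseRecOn with
  | nil => intro u _; rfl
  | append_singleton t v ih =>
    intro u hu
    simp only [List.mem_append, List.mem_singleton, not_or] at hu
    rw [pvFin_append, if_neg hu.2]
    exact ih u hu.1

lemma pvFoldlMax_base (h : Int → Int) :
    ∀ (t : List Int) (b c : Int),
      t.foldl (fun s p => max s (h p)) (max b c) = max (t.foldl (fun s p => max s (h p)) b) c := by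
  intro t
  induction t with
  | nil => intro b c; rfl
  | cons p t ih =>
    intro b c
    simp only [List.foldl_cons]
    rw [max_right_comm b c (h p), ih]

lemma pvFoldlMax_update (f g : Int → Int) (v fin : Int)
    (hfg : ∀ p, p ≠ v → g p = f p) (hgv : g v = fin) (hfv : f v = 0) :
    ∀ (l : List Int) (b : Int), 0 ≤ b →
      l.foldl (fun s p => max s (g p)) b
        = if v ∈ l then max (l.foldl (fun s p => max s (f p)) b) fin
          else l.foldl (fun s p => max s (f p)) b := by
  intro l
  induction l with
  | nil => intro b hb; simp
  | cons p t ih =>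
    intro b hb
    by_cases hp : p = v
    · subst hp
      simp only [List.foldl_cons, hgv, hfv, List.mem_cons, true_or, if_pos]
      rw [max_eq_left hb, pvFoldlMax_base g t b fin]
      by_cases hv' : p ∈ t
      · rw [ih b hb, if_pos hv', max_assoc, max_self]
      · rw [ih b hb, if_neg hv']
    · simp only [List.foldl_cons, hfg p hp]
      have hb' : (0 : Int) ≤ max b (f p) := le_trans hb (le_max_left _ _)
      rw [ih (max b (f p)) hb']
      have hm : (v ∈ p :: t) ↔ v ∈ t := by
        simp only [List.mem_cons, or_iff_right_iff_imp]
        intro h; exact absurd h.symm hp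
      by_cases hv' : v ∈ t
      · rw [if_pos hv', if_pos (hm.2 hv')]
      · rw [if_neg hv', if_neg (fun h => hv' (hm.1 h))]

lemma pvPull_update (pr : List (Int × Int)) (f g : Int → Int) (v fin : Int)
    (hfg : ∀ p, p ≠ v → g p = f p) (hgv : g v = fin) (hfv : f v = 0) (u : Int) :
    pvPull pr g u
      = if v ∈ pvP pr u then max (pvPull pr f u) fin else pvPull pr f u := by
  unfold pvPull
  exact pvFoldlMax_update f g v fin hfg hgv hfv (pvP pr u) 0 le_rfl

lemma pvPull_zero (pr : List (Int × Int)) (u : Int) : pvPull pr (fun _ => 0) u = 0 := by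
  have aux : ∀ (l : List Int) (b : Int), 0 ≤ b →
      l.foldl (fun s (_ : Int) => max s (0 : Int)) b = b := by
    intro l
    induction l with
    | nil => intro b _; rfl
    | cons p t ih => intro b hb; simp only [List.foldl_cons]; rw [max_eq_left hb]; exact ih b hb
  simp only [pvPull]
  exact aux _ 0 le_rfl

-- One pop's inner edge loop: A's (es, indeg, queue) fold against B's (indeg, queue) fold.
lemma pvInner (fin : Int) :
    ∀ (l : List Int) (es ind : PySem.Dict Int Int) (q : List Int),
    q.Nodup → (∀ u ∈ q, ind.getD u 0 = 0) → (∀ u, ((l.count u : Int) ≤ ind.getD u 0)) →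
    (l.foldl
        (fun (st : PySem.Dict Int Int × PySem.Dict Int Int × List Int) b =>
          (st.1.insert b (max (st.1.getD b 0) fin),
           st.2.1.insert b (st.2.1.getD b 0 - 1),
           if (st.2.1.insert b (st.2.1.getD b 0 - 1)).getD b 0 == 0 then st.2.2 ++ [b]
           else st.2.2))
        (es, ind, q)).2
      = l.foldl
          (fun (st : PySem.Dict Int Int × List Int) w =>
            (st.1.insert w (st.1.getD w 0 - 1),
             if (st.1.insert w (st.1.getD w 0 - 1)).getD w 0 == 0 then st.2 ++ [w]
             else st.2))
          (ind, q)
    ∧ (∀ u, (l.foldl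
        (fun (st : PySem.Dict Int Int × PySem.Dict Int Int × List Int) b =>
          (st.1.insert b (max (st.1.getD b 0) fin),
           st.2.1.insert b (st.2.1.getD b 0 - 1),
           if (st.2.1.insert b (st.2.1.getD b 0 - 1)).getD b 0 == 0 then st.2.2 ++ [b]
           else st.2.2))
        (es, ind, q)).1.getD u 0
        = if u ∈ l then max (es.getD u 0) fin else es.getD u 0)
    ∧ (∀ u, (l.foldl
          (fun (st : PySem.Dict Int Int × List Int) w =>
            (st.1.insert w (st.1.getD w 0 - 1),
             if (st.1.insert w (st.1.getD w 0 - 1)).getD w 0 == 0 then st.2 ++ [w]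
             else st.2))
          (ind, q)).1.getD u 0 = ind.getD u 0 - l.count u)
    ∧ (l.foldl
          (fun (st : PySem.Dict Int Int × List Int) w =>
            (st.1.insert w (st.1.getD w 0 - 1),
             if (st.1.insert w (st.1.getD w 0 - 1)).getD w 0 == 0 then st.2 ++ [w]
             else st.2))
          (ind, q)).2.Nodup
    ∧ (∀ u ∈ (l.foldl
          (fun (st : PySem.Dict Int Int × List Int) w =>
            (st.1.insert w (st.1.getD w 0 - 1),
             if (st.1.insert w (st.1.getD w 0 - 1)).getD w 0 == 0 then st.2 ++ [w]
             else st.2))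
          (ind, q)).2, u ∈ q ∨ u ∈ l)
    ∧ (∀ u ∈ (l.foldl
          (fun (st : PySem.Dict Int Int × List Int) w =>
            (st.1.insert w (st.1.getD w 0 - 1),
             if (st.1.insert w (st.1.getD w 0 - 1)).getD w 0 == 0 then st.2 ++ [w]
             else st.2))
          (ind, q)).2,
        (l.foldl
          (fun (st : PySem.Dict Int Int × List Int) w =>
            (st.1.insert w (st.1.getD w 0 - 1),
             if (st.1.insert w (st.1.getD w 0 - 1)).getD w 0 == 0 then st.2 ++ [w]
             else st.2))
          (ind, q)).1.getD u 0 = 0) := by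
  intro l
  induction l with
  | nil =>
    intro es ind q hnd hq0 hcount
    refine ⟨rfl, ?_, ?_, hnd, ?_, ?_⟩
    · intro u; simp
    · intro u; simp
    · intro u hu; exact Or.inl hu
    · intro u hu; exact hq0 u hu
  | cons b t ih =>
    intro es ind q hnd hq0 hcount
    have hbq : b ∉ q := by
      intro hb
      have hc := hcount b
      rw [hq0 b hb, List.count_cons_self] at hc
      push_cast at hc
      omega
    have hgb : (ind.insert b (ind.getD b 0 - 1)).getD b 0 = ind.getD b 0 - 1 :=
      PySem.Dict.getD_insert_self ind b _ 0
    -- the new queue (same term in both folds)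
    have hnd1 : (if (ind.insert b (ind.getD b 0 - 1)).getD b 0 == 0 then q ++ [b]
        else q).Nodup := by
      split
      · have hx : ∀ a ∈ q, ¬ a = b := fun a ha h => hbq (h ▸ ha)
        simp [List.nodup_append, hnd]
        exact hx
      · exact hnd
    have hq01 : ∀ u ∈ (if (ind.insert b (ind.getD b 0 - 1)).getD b 0 == 0 then q ++ [b]
        else q), (ind.insert b (ind.getD b 0 - 1)).getD u 0 = 0 := by
      intro u hu
      have huq : u ∈ q → (ind.insert b (ind.getD b 0 - 1)).getD u 0 = 0 := by
        intro huq
        have hub : u ≠ b := fun h => hbq (h ▸ huq)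
        rw [PySem.Dict.getD_insert_of_ne _ _ _ hub]
        exact hq0 u huq
      by_cases hz : (ind.insert b (ind.getD b 0 - 1)).getD b 0 == 0
      · rw [if_pos hz] at hu
        rcases List.mem_append.1 hu with h | h
        · exact huq h
        · rw [List.mem_singleton] at h
          subst h
          exact beq_iff_eq.1 hz
      · rw [if_neg hz] at hu
        exact huq hu
    have hcount1 : ∀ u, ((t.count u : Int) ≤ (ind.insert b (ind.getD b 0 - 1)).getD u 0) := by
      intro u
      by_cases hub : u = b
      · subst hub
        rw [PySem.Dict.getD_insert_self]
        have := hcount u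
        rw [List.count_cons_self] at this
        push_cast at this ⊢
        omega
      · rw [PySem.Dict.getD_insert_of_ne _ _ _ hub]
        have := hcount u
        rw [List.count_cons] at this
        simp only [beq_iff_eq] at this
        push_cast at this ⊢
        omega
    have IH := ih (es.insert b (max (es.getD b 0) fin)) (ind.insert b (ind.getD b 0 - 1))
      (if (ind.insert b (ind.getD b 0 - 1)).getD b 0 == 0 then q ++ [b] else q)
      hnd1 hq01 hcount1
    obtain ⟨C1, C2, C3, C4, C5, C6⟩ := IH
    simp only [List.foldl_cons]
    refine ⟨C1, ?_, ?_, C4, ?_, C6⟩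
    · intro u
      rw [C2 u]
      by_cases hub : u = b
      · subst hub
        rw [PySem.Dict.getD_insert_self]
        by_cases hut : u ∈ t
        · rw [if_pos hut, if_pos (List.mem_cons_self), max_assoc, max_self]
        · rw [if_neg hut, if_pos (List.mem_cons_self)]
      · rw [PySem.Dict.getD_insert_of_ne _ _ _ hub]
        have hm : (u ∈ b :: t) ↔ u ∈ t := by
          simp only [List.mem_cons, or_iff_right_iff_imp]
          intro h; exact absurd h hub
        by_cases hut : u ∈ t
        · rw [if_pos hut, if_pos (hm.2 hut)]
        · rw [if_neg hut, if_neg (fun h => hut (hm.1 h))]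
    · intro u
      rw [C3 u]
      by_cases hub : u = b
      · subst hub
        rw [PySem.Dict.getD_insert_self, List.count_cons_self]
        push_cast
        ring
      · rw [PySem.Dict.getD_insert_of_ne _ _ _ hub, List.count_cons]
        have hbu : ¬ b = u := fun h => hub h.symm
        simp only [beq_iff_eq, hbu, if_false]
        push_cast
        ring
    · intro u hu
      rcases C5 u hu with h | h
      · by_cases hz : (ind.insert b (ind.getD b 0 - 1)).getD b 0 == 0
        · rw [if_pos hz] at h
          rcases List.mem_append.1 h with h' | h'
          · exact Or.inl h'
          · rw [List.mem_singleton] at h'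
            exact Or.inr (h' ▸ List.mem_cons_self)
        · rw [if_neg hz] at h
          exact Or.inl h
      · exact Or.inr (List.mem_cons_of_mem _ h)


lemma pvSplitA (pr : List (Int × Int)) (g0 : PySem.Dict Int (List Int))
    (i0 : PySem.Dict Int Int) :
    pr.foldl (fun (st : PySem.Dict Int (List Int) × PySem.Dict Int Int) ab =>
        (st.1.modify ab.1 [] (fun l => l ++ [ab.2]), st.2.modify ab.2 0 (fun x => x + 1)))
      (g0, i0)
    = (pr.foldl (fun d ab => d.modify ab.1 [] (fun l => l ++ [ab.2])) g0,
       pr.foldl (fun d ab => d.modify ab.2 0 (fun x => x + 1)) i0) := by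
  induction pr generalizing g0 i0 with
  | nil => rfl
  | cons ab t ih => simp only [List.foldl_cons]; exact ih _ _

lemma pvSplitB (pr : List (Int × Int)) (s0 p0 : PySem.Dict Int (List Int))
    (i0 : PySem.Dict Int Int) :
    pr.foldl (fun (t : PySem.Dict Int (List Int) × PySem.Dict Int (List Int) × PySem.Dict Int Int) ab =>
        (t.1.modify ab.1 [] (fun l => l ++ [ab.2]),
         t.2.1.modify ab.2 [] (fun l => l ++ [ab.1]),
         t.2.2.modify ab.2 0 (fun x => x + 1)))
      (s0, p0, i0)
    = (pr.foldl (fun d ab => d.modify ab.1 [] (fun l => l ++ [ab.2])) s0,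
       pr.foldl (fun d ab => d.modify ab.2 [] (fun l => l ++ [ab.1])) p0,
       pr.foldl (fun d ab => d.modify ab.2 0 (fun x => x + 1)) i0) := by
  induction pr generalizing s0 p0 i0 with
  | nil => rfl
  | cons ab t ih => simp only [List.foldl_cons]; exact ih _ _ _

-- The simulation: A's interleaved loop computes exactly the pull-DP values of B's
-- phase-1 order, and preserves the key set of earliest_finish.
lemma pvSim (tl : List Int) (pr : List (Int × Int))
    (graphD : PySem.Dict Int (List Int)) (durD : PySem.Dict Int Int)
    (hG : ∀ c, graphD.getD c [] = pvS pr c)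
    (hdur : ∀ v ∈ pvK tl.length, durD.getD v 0 = PySem.List.pyGetD tl (v - 1) 0)
    (hpre : ∀ ab ∈ pr, 1 ≤ ab.1 ∧ ab.1 ≤ (tl.length : Int) ∧ 1 ≤ ab.2 ∧
      ab.2 ≤ (tl.length : Int)) :
    ∀ (fuel : Nat) (q : List Int) (indeg es ef : PySem.Dict Int Int) (o : List Int),
    (o ++ q).Nodup →
    (∀ u ∈ o ++ q, u ∈ pvK tl.length) →
    (∀ u ∈ q, indeg.getD u 0 = 0) →
    (∀ u, indeg.getD u 0 = (((pvP pr u).filter (fun p => !decide (p ∈ o))).length : Int)) →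
    (∀ u ∈ o, ∀ p ∈ pvP pr u, p ∈ o) →
    (∀ u, es.getD u 0 = pvPull pr (pvFin tl pr o) u) →
    (∀ u, ef.getD u 0 = pvFin tl pr o u) →
    ef.keys = pvK tl.length →
    (∀ u, (pvALoop graphD durD fuel q es ef indeg).getD u 0
        = pvFin tl pr (pvPhase1 graphD fuel q indeg o) u)
    ∧ (pvALoop graphD durD fuel q es ef indeg).keys = pvK tl.length
    ∧ (∀ u ∈ pvPhase1 graphD fuel q indeg o, u ∈ pvK tl.length) := by
  intro fuel
  induction fuel with
  | zero =>
    intro q indeg es ef o h1 h2 h3 h4 h5 h6 h7 h8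
    exact ⟨fun u => h7 u, h8, fun u hu => h2 u (List.mem_append_left _ hu)⟩
  | succ f ihf =>
    intro q indeg es ef o h1 h2 h3 h4 h5 h6 h7 h8
    cases q with
    | nil => exact ⟨fun u => h7 u, h8, fun u hu => h2 u (List.mem_append_left _ hu)⟩
    | cons v rest =>
      have h1x := h1
      rw [List.nodup_append] at h1x
      obtain ⟨hond, hvrnd, hdisj⟩ := h1x
      have hvo : v ∉ o := fun h => hdisj v h v (List.mem_cons_self) rfl
      have hvrest : v ∉ rest := (List.nodup_cons.1 hvrnd).1
      have hrestnd : rest.Nodup := (List.nodup_cons.1 hvrnd).2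
      have hvK : v ∈ pvK tl.length :=
        h2 v (List.mem_append_right _ (List.mem_cons_self))
      -- all predecessors of v are already processed
      have hvpred : ∀ p ∈ pvP pr v, p ∈ o := by
        have h0 := h3 v (List.mem_cons_self)
        rw [h4 v] at h0
        have hlen : ((pvP pr v).filter (fun p => !decide (p ∈ o))).length = 0 := by
          exact_mod_cast h0
        intro p hp
        by_contra hpo
        have hmem : p ∈ (pvP pr v).filter (fun p => !decide (p ∈ o)) :=
          List.mem_filter.2 ⟨hp, by simp [hpo]⟩
        rw [List.length_eq_zero_iff.1 hlen] at hmem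
        exact List.not_mem_nil hmem
      -- the inner edge loop
      have hcnt : ∀ u, (((pvS pr v).count u : Int) ≤ indeg.getD u 0) := by
        intro u
        rw [h4 u, pvS_count]
        exact_mod_cast pvCount_le (pvP pr u) o v hvo
      have hq0rest : ∀ u ∈ rest, indeg.getD u 0 = 0 :=
        fun u hu => h3 u (List.mem_cons_of_mem _ hu)
      obtain ⟨C1, C2, C3, C4, C5, C6⟩ :=
        pvInner (es.getD v 0 + durD.getD v 0) (pvS pr v) es indeg rest hrestnd hq0rest hcnt
      -- facts about the new queue elements
      have hnew : ∀ u ∈ (List.foldl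
          (fun (st : PySem.Dict Int Int × List Int) w =>
            (st.1.insert w (st.1.getD w 0 - 1),
             if (st.1.insert w (st.1.getD w 0 - 1)).getD w 0 == 0 then st.2 ++ [w]
             else st.2))
          (indeg, rest) (pvS pr v)).2, u ∉ o ∧ u ≠ v ∧ u ∈ pvK tl.length := by
        intro u hu
        rcases C5 u hu with h | h
        · refine ⟨fun ho => hdisj u ho u (List.mem_cons_of_mem _ h) rfl, ?_, ?_⟩
          · intro he; exact hvrest (he ▸ h)
          · exact h2 u (List.mem_append_right _ (List.mem_cons_of_mem _ h))
        · have hvp : v ∈ pvP pr u := (pvS_mem pr v u).1 h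
          have hvu : (v, u) ∈ pr := (pvP_mem pr v u).1 hvp
          refine ⟨?_, ?_, ?_⟩
          · intro ho; exact hvo (h5 u ho v hvp)
          · intro he
            subst he
            exact hvo (hvpred u hvp)
          · rw [pvK_mem]
            have := hpre (v, u) hvu
            exact ⟨this.2.2.1, this.2.2.2⟩
      -- hypotheses for the induction step at o ++ [v]
      have h1' : ((o ++ [v]) ++ (List.foldl
          (fun (st : PySem.Dict Int Int × List Int) w =>
            (st.1.insert w (st.1.getD w 0 - 1),
             if (st.1.insert w (st.1.getD w 0 - 1)).getD w 0 == 0 then st.2 ++ [w]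
             else st.2))
          (indeg, rest) (pvS pr v)).2).Nodup := by
        rw [List.nodup_append]
        refine ⟨?_, C4, ?_⟩
        · rw [List.nodup_append]
          refine ⟨hond, List.nodup_singleton v, ?_⟩
          intro a ha b hb hab
          rw [List.mem_singleton] at hb
          subst hb
          exact hvo (hab ▸ ha)
        · intro a ha b hb hab
          obtain ⟨hno, hnv, _⟩ := hnew b hb
          rcases List.mem_append.1 ha with h | h
          · exact hno (hab ▸ h)
          · exact hnv ((hab.symm.trans (List.mem_singleton.1 h)))
      have h2' : ∀ u ∈ (o ++ [v]) ++ (List.foldl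
          (fun (st : PySem.Dict Int Int × List Int) w =>
            (st.1.insert w (st.1.getD w 0 - 1),
             if (st.1.insert w (st.1.getD w 0 - 1)).getD w 0 == 0 then st.2 ++ [w]
             else st.2))
          (indeg, rest) (pvS pr v)).2, u ∈ pvK tl.length := by
        intro u hu
        rcases List.mem_append.1 hu with h | h
        · rcases List.mem_append.1 h with h' | h'
          · exact h2 u (List.mem_append_left _ h')
          · exact (List.mem_singleton.1 h') ▸ hvK
        · exact (hnew u h).2.2
      have h4' : ∀ u, (List.foldl
          (fun (st : PySem.Dict Int Int × List Int) w =>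
            (st.1.insert w (st.1.getD w 0 - 1),
             if (st.1.insert w (st.1.getD w 0 - 1)).getD w 0 == 0 then st.2 ++ [w]
             else st.2))
          (indeg, rest) (pvS pr v)).1.getD u 0
          = (((pvP pr u).filter (fun p => !decide (p ∈ o ++ [v]))).length : Int) := by
        intro u
        rw [C3 u, h4 u, pvS_count]
        have hstep := pvFilter_step (pvP pr u) o v hvo
        push_cast [← hstep]
        ring
      have h5' : ∀ u ∈ o ++ [v], ∀ p ∈ pvP pr u, p ∈ o ++ [v] := by
        intro u hu p hp
        rcases List.mem_append.1 hu with h | h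
        · exact List.mem_append_left _ (h5 u h p hp)
        · rw [List.mem_singleton] at h
          subst h
          exact List.mem_append_left _ (hvpred p hp)
      have hfinv : pvFin tl pr (o ++ [v]) v
          = es.getD v 0 + durD.getD v 0 := by
        rw [pvFin_append, if_pos rfl, h6 v, hdur v hvK]
        ring
      have h6' : ∀ u, (List.foldl
          (fun (st : PySem.Dict Int Int × PySem.Dict Int Int × List Int) b =>
            (st.1.insert b (max (st.1.getD b 0) (es.getD v 0 + durD.getD v 0)),
             st.2.1.insert b (st.2.1.getD b 0 - 1),
             if (st.2.1.insert b (st.2.1.getD b 0 - 1)).getD b 0 == 0 then st.2.2 ++ [b]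
             else st.2.2))
          (es, indeg, rest) (pvS pr v)).1.getD u 0
          = pvPull pr (pvFin tl pr (o ++ [v])) u := by
        intro u
        rw [C2 u]
        have hupd := pvPull_update pr (pvFin tl pr o) (pvFin tl pr (o ++ [v])) v
          (pvFin tl pr (o ++ [v]) v)
          (fun p hp => by rw [pvFin_append, if_neg hp])
          rfl (pvFin_not_mem tl pr o v hvo) u
        rw [hupd, hfinv]
        by_cases hm : u ∈ pvS pr v
        · rw [if_pos hm, if_pos ((pvS_mem pr v u).1 hm), h6 u]
        · rw [if_neg hm, if_neg (fun h => hm ((pvS_mem pr v u).2 h)), h6 u]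
      have h7' : ∀ u, (ef.insert v (es.getD v 0 + durD.getD v 0)).getD u 0
          = pvFin tl pr (o ++ [v]) u := by
        intro u
        rw [PySem.Dict.getD_insert]
        by_cases hu : u = v
        · rw [if_pos hu, hu, hfinv]
        · rw [if_neg hu, pvFin_append, if_neg hu]
          exact h7 u
      have h8' : (ef.insert v (es.getD v 0 + durD.getD v 0)).keys = pvK tl.length := by
        rw [PySem.Dict.keys_insert_of_contains]
        · exact h8
        · exact (PySem.Dict.contains_iff_mem_keys ef v).2 (h8 ▸ hvK)
      have IHres := ihf _ _ _ _ (o ++ [v]) h1' h2' C6 h4' h5' h6' h7' h8'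
      simp only [pvALoop, pvPhase1, hG v]
      rw [C1]
      exact IHres


lemma pvPhase2_getD (tl : List Int) (pr : List (Int × Int))
    (predsD : PySem.Dict Int (List Int)) (hP : ∀ c, predsD.getD c [] = pvP pr c) :
    ∀ (o : List Int) (d : PySem.Dict Int Int) (f : Int → Int),
    (∀ u, d.getD u 0 = f u) →
    ∀ u, (pvPhase2 predsD tl o d).getD u 0 = pvFinFrom tl pr f o u := by
  intro o
  induction o with
  | nil => intro d f hd u; exact hd u
  | cons v t ih =>
    intro d f hd u
    unfold pvPhase2 at *
    simp only [List.foldl_cons]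
    unfold pvFinFrom at *
    simp only [List.foldl_cons]
    refine ih _ _ ?_ u
    intro w
    rw [PySem.Dict.getD_insert]
    have hs : (predsD.getD v []).foldl (fun s p => max s (d.getD p 0)) 0 = pvPull pr f v := by
      rw [hP v]
      unfold pvPull
      refine PySem.List.foldl_congr_mem _ _ _ _ ?_
      intro acc p _
      rw [hd p]
    split <;> simp_all

lemma pvPhase2_keys (tl : List Int) (predsD : PySem.Dict Int (List Int))
    (o : List Int) (d : PySem.Dict Int Int) :
    (pvPhase2 predsD tl o d).keys = PySem.Set.update d.keys o := by
  unfold pvPhase2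
  exact PySem.Dict.keys_foldl_insert o
    (fun fin v => PySem.List.pyGetD tl (v - 1) 0
      + (predsD.getD v []).foldl (fun s p => max s (fin.getD p 0)) 0) d

-- ===== VERDICT (by name: the statement is the Claim_ definition above) =====
theorem calculate_min_time_spec : Claim_equal_calculate_min_time := by
  intro tl pr _ hpre
  unfold Spec_calculate_min_time calculate_min_time calculate_min_time_alt
  by_cases hn : ((tl.length : Int) == 0) = true
  · rw [if_pos hn, if_pos hn]
  · replace hpre : ∀ ab ∈ pr, 1 ≤ ab.1 ∧ ab.1 ≤ (tl.length : Int) ∧ 1 ≤ ab.2 ∧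
        ab.2 ≤ (tl.length : Int) := by
      rcases hpre with h | h
      · exfalso
        apply hn
        rw [h]
        rfl
      · exact h
    rw [if_neg hn, if_neg hn]
    simp only [pvInitA_eq, pvInitB_eq, pvProjects_eq, pvRange1_eq, pvSplitA, pvSplitB]
    set I := List.foldl (fun d ab => d.modify ab.2 0 fun x => x + 1)
      (pvInit tl.length fun _ => (0 : Int)) pr with hIdef
    set G := List.foldl (fun d ab => d.modify ab.1 [] fun l => l ++ [ab.2])
      (pvInit tl.length fun _ => ([] : List Int)) pr with hGdef
    set Pd := List.foldl (fun d ab => d.modify ab.2 [] fun l => l ++ [ab.1])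
      (pvInit tl.length fun _ => ([] : List Int)) pr with hPdef
    set D := pvInit tl.length (fun v => PySem.List.pyGetD tl (v - 1) 0) with hDdef
    set Q := List.filter (fun p => I.getD p 0 == 0) (pvK tl.length) with hQdef
    set Fu := tl.length + pr.length + 1 with hFdef
    have hG' : ∀ c, G.getD c [] = pvS pr c := fun c => by
      rw [hGdef]; exact pvGraph_getD pr tl.length c
    have hI' : ∀ c, I.getD c 0 = ((pvP pr c).length : Int) := fun c => by
      rw [hIdef]; exact pvIndeg_getD pr tl.length c
    have hP' : ∀ c, Pd.getD c [] = pvP pr c := fun c => by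
      rw [hPdef]; exact pvPreds_getD pr tl.length c
    have hdur : ∀ v ∈ pvK tl.length, D.getD v 0 = PySem.List.pyGetD tl (v - 1) 0 := by
      intro v hv; rw [hDdef, pvInit_getD, if_pos ((pvK_mem _ _).1 hv)]
    have hz : ∀ u, (pvInit tl.length (fun _ => (0 : Int))).getD u 0 = 0 := by
      intro u; rw [pvInit_getD]; split <;> rfl
    have hQnd : (([] : List Int) ++ Q).Nodup := by
      rw [List.nil_append, hQdef]; exact (pvK_nodup tl.length).filter _
    have hQsub : ∀ u ∈ ([] : List Int) ++ Q, u ∈ pvK tl.length := by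
      intro u hu; rw [List.nil_append, hQdef] at hu; exact (List.mem_filter.1 hu).1
    have hQ0 : ∀ u ∈ Q, I.getD u 0 = 0 := by
      intro u hu; rw [hQdef] at hu; exact beq_iff_eq.1 (List.mem_filter.1 hu).2
    have h4 : ∀ u, I.getD u 0
        = (((pvP pr u).filter (fun p => !decide (p ∈ ([] : List Int)))).length : Int) := by
      intro u
      rw [hI' u]
      congr 2
      refine (List.filter_eq_self.2 ?_).symm
      intro p _; simp
    have h6 : ∀ u, (pvInit tl.length (fun _ => (0 : Int))).getD u 0
        = pvPull pr (pvFin tl pr []) u := by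
      intro u; rw [hz u]; exact (pvPull_zero pr u).symm
    have h7 : ∀ u, (pvInit tl.length (fun _ => (0 : Int))).getD u 0 = pvFin tl pr [] u := hz
    obtain ⟨S1, S2, S3⟩ := pvSim tl pr G D hG' hdur hpre Fu Q I
      (pvInit tl.length (fun _ => (0 : Int))) (pvInit tl.length (fun _ => (0 : Int))) []
      hQnd hQsub hQ0 h4 (fun u hu => nomatch hu) h6 h7 (pvInit_keys tl.length _)
    have hfin2 := pvPhase2_getD tl pr Pd hP' (pvPhase1 G Fu Q I [])
      (pvInit tl.length (fun _ => (0 : Int))) (fun _ => 0) hz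
    have hk2 : (pvPhase2 Pd tl (pvPhase1 G Fu Q I [])
        (pvInit tl.length (fun _ => (0 : Int)))).keys = pvK tl.length := by
      rw [pvPhase2_keys, pvInit_keys]
      exact pvSet_update_self _ _ S3
    have hv1 : (pvALoop G D Fu Q (pvInit tl.length (fun _ => (0 : Int)))
          (pvInit tl.length (fun _ => (0 : Int))) I).values
        = (pvK tl.length).map (fun k => pvFin tl pr (pvPhase1 G Fu Q I []) k) := by
      rw [PySem.Dict.values_eq_map_keys _ (by rw [S2]; exact pvK_nodup _) 0, S2]
      exact List.map_congr_left (fun k _ => S1 k)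
    have hv2 : (pvPhase2 Pd tl (pvPhase1 G Fu Q I [])
          (pvInit tl.length (fun _ => (0 : Int)))).values
        = (pvK tl.length).map (fun k => pvFin tl pr (pvPhase1 G Fu Q I []) k) := by
      rw [PySem.Dict.values_eq_map_keys _ (by rw [hk2]; exact pvK_nodup _) 0, hk2]
      exact List.map_congr_left (fun k _ => hfin2 k)
    rw [hv1, hv2]
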